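-- pv_equiv track=rewrite | github.com/NnopponS/WheelSense_Project | docker/backend/src/core/state_manager.py | _normalize_room_name
-- ===== SOURCE A (Python) =====
-- ROOM_NAMES = {
--     "bedroom": "Bedroom",
--     "bathroom": "Bathroom",
--     "kitchen": "Kitchen",
--     "livingroom": "Living Room"
-- }
--
-- ROOM_IDS = {v: k for k, v in ROOM_NAMES.items()}
--
-- def _normalize_room_name(room: str) -> str:
--     """
--     Normalize room name to lowercase ID format.
--
--     Handles all variations:
--     - "Living Room" -> "livingroom"
--     - "living room" -> "livingroom"
--     - "livingroom" -> "livingroom"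
--     - "Bedroom" -> "bedroom"
--     - "bedroom" -> "bedroom"
--
--     Args:
--         room: Room name (may be English name or lowercase ID)
--
--     Returns:
--         Lowercase room ID (e.g., "bedroom", "livingroom")
--     """
--     if not room:
--         return ""
--
--     room_lower = room.lower().strip()
--     # Remove spaces for matching
--     room_lower = room_lower.replace(" ", "")
--
--     # Check if already normalized (direct match in ROOM_NAMES)
--     if room_lower in ROOM_NAMES:
--         return room_lower
--
--     # Handle special case: "living" -> "livingroom"
--     if room_lower == "living":
--         return "livingroom"
--
--     # If it's already a normalized ID (in ROOM_IDS values), return as-is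
--     # ROOM_IDS.values() = ["bedroom", "livingroom", "kitchen", "bathroom"]
--     if room_lower in ROOM_IDS.values():
--         return room_lower
--
--     # Try to match against English names (normalized)
--     # This handles cases where input is an English name like "Living Room" or "Bedroom"
--     for english_name, room_id in ROOM_IDS.items():
--         english_normalized = english_name.lower().replace(" ", "")
--         if room_lower == english_normalized:
--             return room_id
--
--     # Fallback: return normalized lowercase (may be invalid, but let caller handle validation)
--     return room_lower
-- ===== SOURCE B (Python) =====
-- def _normalize_room_name(room: str) -> str:
--     if not room:
--         return ""
--     room_lower = room.lower().strip().replace(" ", "")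
--     return "livingroom" if room_lower == "living" else room_lower
-- ===== Notes on version B (the rewrite author's own statement) =====
-- stated objective: simpler
-- what changed: Both module dicts, all three membership checks and the matching loop are removed: every non-'living' branch of A returns the normalized string itself, so B reduces to the normalization plus one special case.
import Mathlib
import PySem

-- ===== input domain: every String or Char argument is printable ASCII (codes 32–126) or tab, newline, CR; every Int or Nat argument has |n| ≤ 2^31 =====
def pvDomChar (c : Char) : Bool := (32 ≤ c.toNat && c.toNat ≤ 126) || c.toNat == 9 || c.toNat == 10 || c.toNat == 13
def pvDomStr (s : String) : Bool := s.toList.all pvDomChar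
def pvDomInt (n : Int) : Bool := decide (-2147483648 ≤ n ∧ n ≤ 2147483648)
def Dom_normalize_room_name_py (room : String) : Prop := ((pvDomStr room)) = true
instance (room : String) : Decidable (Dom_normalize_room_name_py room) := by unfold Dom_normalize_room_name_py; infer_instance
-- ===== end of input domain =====

-- B drops A's two module dicts, the three membership checks and the matching loop (all of which
-- return the normalized string itself except the "living" case); same return values, simpler code.

-- ===== PORT A =====
def pvROOM_NAMES : PySem.Dict String String :=
  PySem.Dict.ofList
    [("bedroom", "Bedroom"), ("bathroom", "Bathroom"),
     ("kitchen", "Kitchen"), ("livingroom", "Living Room")]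

def pvROOM_IDS : PySem.Dict String String :=
  PySem.Dict.ofList (pvROOM_NAMES.items.map (fun p => (p.2, p.1)))

-- the 'for english_name, room_id in ROOM_IDS.items()' loop with its early return
def pvLoopA : List (String × String) → String → Option String
  | [], _ => none
  | (en, rid) :: rest, s =>
      if s = PySem.Str.replace (PySem.Str.lower en) " " "" then some rid
      else pvLoopA rest s

def normalize_room_name_py (room : String) : String :=
  if room = "" then ""
  else
    let room_lower := PySem.Str.replace (PySem.Str.strip (PySem.Str.lower room)) " " ""
    if pvROOM_NAMES.contains room_lower then room_lower
    else if room_lower = "living" then "livingroom"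
    else if pvROOM_IDS.values.contains room_lower then room_lower
    else
      match pvLoopA pvROOM_IDS.items room_lower with
      | some rid => rid
      | none => room_lower

-- ===== PORT B =====
def normalize_room_name_py_alt (room : String) : String :=
  if room = "" then ""
  else
    let room_lower := PySem.Str.replace (PySem.Str.strip (PySem.Str.lower room)) " " ""
    if room_lower = "living" then "livingroom" else room_lower

-- ===== PRECONDITION & SPEC =====
def Spec_normalize_room_name_py (room : String) (out : String) : Prop := out = normalize_room_name_py_alt room
instance (room : String) (out : String) : Decidable (Spec_normalize_room_name_py room out) := by unfold Spec_normalize_room_name_py; infer_instance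

-- ===== CLAIM (what is proved, stated in full; the proofs are below) =====
def Claim_equal_normalize_room_name_py : Prop := ∀ (room : String), Dom_normalize_room_name_py room → Spec_normalize_room_name_py room (normalize_room_name_py room)

-- ===== LEMMAS AND PROOFS =====

-- On any normalized string s, A's dict checks and loop all return s itself,
-- so A's body agrees with B's single "living" test.
lemma pv_names_eq : pvROOM_NAMES = PySem.Dict.mk
    [("bedroom", "Bedroom"), ("bathroom", "Bathroom"),
     ("kitchen", "Kitchen"), ("livingroom", "Living Room")] := by rfl

lemma pv_ids_eq : pvROOM_IDS = PySem.Dict.mk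
    [("Bedroom", "bedroom"), ("Bathroom", "bathroom"),
     ("Kitchen", "kitchen"), ("Living Room", "livingroom")] := by rfl

-- the loop's normalized English names, evaluated
lemma pv_norm1 : PySem.Str.replace (PySem.Str.lower "Bedroom") " " "" = "bedroom" := by rfl
lemma pv_norm2 : PySem.Str.replace (PySem.Str.lower "Bathroom") " " "" = "bathroom" := by rfl
lemma pv_norm3 : PySem.Str.replace (PySem.Str.lower "Kitchen") " " "" = "kitchen" := by rfl
lemma pv_norm4 : PySem.Str.replace (PySem.Str.lower "Living Room") " " "" = "livingroom" := by rfl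

lemma pv_body_eq (s : String) :
    (if pvROOM_NAMES.contains s then s
     else if s = "living" then "livingroom"
     else if pvROOM_IDS.values.contains s then s
     else
       match pvLoopA pvROOM_IDS.items s with
       | some rid => rid
       | none => s) =
    (if s = "living" then "livingroom" else s) := by
  rw [pv_names_eq, pv_ids_eq]
  by_cases h1 : s = "bedroom" <;> by_cases h2 : s = "bathroom" <;>
    by_cases h3 : s = "kitchen" <;> by_cases h4 : s = "livingroom" <;>
    by_cases h5 : s = "living" <;>
    simp_all [pvLoopA, pv_norm1, pv_norm2, pv_norm3, pv_norm4,
      PySem.Dict.contains_mk, PySem.Dict.values_mk]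

-- ===== VERDICT (by name: the statement is the Claim_ definition above) =====
theorem normalize_room_name_py_spec : Claim_equal_normalize_room_name_py := by
  intro room _
  unfold Spec_normalize_room_name_py normalize_room_name_py normalize_room_name_py_alt
  by_cases h : room = ""
  · simp [h]
  · simp only [h, if_false]
    exact pv_body_eq _
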